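-- pv_equiv track=rewrite | github.com/SerendipitySynapses/discrete-event-simulation | phase3.py | calculate_number_patients
-- ===== SOURCE A (Python) =====
-- def calculate_number_patients(start_time, end_time, patients_data):
--     number_of_patients = 0
--     # Loops through each patient to check if they finished within the time frame
--     for patient in patients_data:
--         if start_time < patients_data[patient]['End of part 2 service'] <= end_time:
--             number_of_patients += 1
--         elif patients_data[patient]['End of part 2 service'] > end_time:
--             break
--     return number_of_patients
-- ===== SOURCE B (Python) =====
-- def calculate_number_patients(start_time, end_time, patients_data):
--     # Extract all part-2 end times once, find the cutoff of the leading
--     # prefix with end time <= end_time, then count within that prefix.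
--     ends = [d['End of part 2 service'] for d in patients_data.values()]
--     cut = next((i for i, e in enumerate(ends) if e > end_time), len(ends))
--     return sum(1 for e in ends[:cut] if e > start_time)
-- ===== Notes on version B (the rewrite author's own statement) =====
-- stated objective: alternative
-- what changed: Replaces the single key-iterating loop with counter and break by a three-stage pipeline: extract the list of end times, locate the cutoff index of the prefix that fits under end_time, then count the prefix entries above start_time.
-- outside the precondition, e.g. on calculate_number_patients(0, 10, {'a': {'x': 1}}): A raises KeyError, B raises KeyError; on calculate_number_patients(0, 3, {'a': {'End of part 2 service': 7}, 'b': {}}): A returns 0, B raises KeyError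
import Mathlib
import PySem

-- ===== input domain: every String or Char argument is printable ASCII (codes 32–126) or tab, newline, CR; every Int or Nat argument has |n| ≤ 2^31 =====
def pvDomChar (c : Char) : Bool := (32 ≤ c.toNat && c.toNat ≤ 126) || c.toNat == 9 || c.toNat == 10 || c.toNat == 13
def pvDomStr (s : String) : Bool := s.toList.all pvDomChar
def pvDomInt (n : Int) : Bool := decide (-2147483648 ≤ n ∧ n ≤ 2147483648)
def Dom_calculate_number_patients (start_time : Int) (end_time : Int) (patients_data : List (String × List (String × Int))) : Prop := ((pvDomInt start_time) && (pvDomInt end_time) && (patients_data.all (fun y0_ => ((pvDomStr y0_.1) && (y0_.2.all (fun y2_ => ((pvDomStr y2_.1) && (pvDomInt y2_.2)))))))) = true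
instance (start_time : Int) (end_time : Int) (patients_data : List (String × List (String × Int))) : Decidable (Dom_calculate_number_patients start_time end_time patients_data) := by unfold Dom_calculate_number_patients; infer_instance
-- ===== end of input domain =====

-- B replaces A's counting loop with break by a pipeline (extract end times, find cutoff, count the prefix); same cost, different decomposition.

-- ===== PORT A =====
-- first-match association-list lookup of the inner dict's 'End of part 2 service'
-- (0 default is never reached inside Pre_, which requires the key to be present)
def pvEndOf (kvs : List (String × Int)) : Int :=
  match kvs.find? (fun p => p.1 == "End of part 2 service") with
  | some p => p.2
  | none => 0

-- patients_data[patient]: first-match lookup ([] default never reached: keys come from the dict itself)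
def pvLookupPatient (pd : List (String × List (String × Int))) (k : String) : List (String × Int) :=
  match pd.find? (fun p => p.1 == k) with
  | some p => p.2
  | none => []

-- the for-loop over the dict's keys, with the break as an early return of the accumulator
def pvA_go (start_time end_time : Int) (pd : List (String × List (String × Int))) : List String → Int → Int
  | [], acc => acc
  | k :: ks, acc =>
    let x := pvEndOf (pvLookupPatient pd k)
    if start_time < x ∧ x ≤ end_time then pvA_go start_time end_time pd ks (acc + 1)
    else if end_time < x then acc
    else pvA_go start_time end_time pd ks acc

def calculate_number_patients (start_time : Int) (end_time : Int) (patients_data : List (String × List (String × Int))) : Int :=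
  pvA_go start_time end_time patients_data (patients_data.map Prod.fst) 0

-- ===== PORT B =====
-- cutoff index: first position whose end time exceeds end_time, else the whole list
def pvCut (end_time : Int) (ends : List Int) : Nat :=
  match ends.findIdx? (fun x => decide (end_time < x)) with
  | some i => i
  | none => ends.length

def calculate_number_patients_alt (start_time : Int) (end_time : Int) (patients_data : List (String × List (String × Int))) : Int :=
  let ends := patients_data.map (fun kv => pvEndOf kv.2)
  (((ends.take (pvCut end_time ends)).filter (fun x => decide (start_time < x))).length : Int)

-- ===== PRECONDITION & SPEC =====
-- Pre_ excludes inputs with a patient record lacking the 'End of part 2 service' key: A raises KeyError when it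
-- reaches such a record (though its break may return first), and B's eager extraction of all end times raises there;
-- it also excludes duplicate outer keys, which a Python dict cannot represent (the association-list model would diverge).
def Pre_calculate_number_patients (start_time : Int) (end_time : Int) (patients_data : List (String × List (String × Int))) : Prop :=
  (patients_data.map Prod.fst).Nodup ∧
  ∀ kv ∈ patients_data, "End of part 2 service" ∈ kv.2.map Prod.fst
instance (start_time : Int) (end_time : Int) (patients_data : List (String × List (String × Int))) : Decidable (Pre_calculate_number_patients start_time end_time patients_data) := by unfold Pre_calculate_number_patients; infer_instance

def pvWitness_calculate_number_patients : Int × Int × (List (String × List (String × Int))) :=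
  (0, 10, [("a", [("End of part 2 service", 5)]), ("b", [("End of part 2 service", 20)])])

def Spec_calculate_number_patients (start_time : Int) (end_time : Int) (patients_data : List (String × List (String × Int))) (out : Int) : Prop := out = calculate_number_patients_alt start_time end_time patients_data
instance (start_time : Int) (end_time : Int) (patients_data : List (String × List (String × Int))) (out : Int) : Decidable (Spec_calculate_number_patients start_time end_time patients_data out) := by unfold Spec_calculate_number_patients; infer_instance

-- ===== CLAIM (what is proved, stated in full; the proofs are below) =====
def Claim_equal_calculate_number_patients : Prop := ∀ (start_time : Int) (end_time : Int) (patients_data : List (String × List (String × Int))), Dom_calculate_number_patients start_time end_time patients_data → Pre_calculate_number_patients start_time end_time patients_data → Spec_calculate_number_patients start_time end_time patients_data (calculate_number_patients start_time end_time patients_data)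

-- ===== LEMMAS AND PROOFS =====

-- B's pipeline applied to a list of end times
def pvCount (start_time end_time : Int) (ends : List Int) : Int :=
  (((ends.take (pvCut end_time ends)).filter (fun x => decide (start_time < x))).length : Int)

lemma pvCut_nil (e : Int) : pvCut e [] = 0 := rfl

lemma pvCut_cons_pos (e x : Int) (xs : List Int) (h : e < x) : pvCut e (x :: xs) = 0 := by
  simp [pvCut, List.findIdx?_cons, h]

lemma pvCut_cons_neg (e x : Int) (xs : List Int) (h : ¬ e < x) : pvCut e (x :: xs) = pvCut e xs + 1 := by
  simp only [pvCut, List.findIdx?_cons, decide_eq_true_eq]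
  rw [if_neg h]
  cases hfi : xs.findIdx? (fun x => decide (e < x)) <;> simp [hfi, List.length_cons]

lemma pvA_go_count (s e : Int) (pd : List (String × List (String × Int))) :
    ∀ (ks : List String) (acc : Int),
      pvA_go s e pd ks acc = acc + pvCount s e (ks.map (fun k => pvEndOf (pvLookupPatient pd k))) := by
  intro ks
  induction ks with
  | nil => intro acc; simp [pvA_go, pvCount, pvCut_nil]
  | cons k ks ih =>
    intro acc
    simp only [pvA_go, List.map_cons]
    set x := pvEndOf (pvLookupPatient pd k) with hx
    by_cases h1 : s < x ∧ x ≤ e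
    · rw [if_pos h1, ih]
      have hc : pvCut e (x :: ks.map (fun k => pvEndOf (pvLookupPatient pd k))) =
          pvCut e (ks.map (fun k => pvEndOf (pvLookupPatient pd k))) + 1 :=
        pvCut_cons_neg _ _ _ (by omega)
      simp only [pvCount, hc, List.take_succ_cons, List.filter_cons,
        decide_eq_true_eq, if_pos h1.1, List.length_cons]
      push_cast; ring
    · rw [if_neg h1]
      by_cases h2 : e < x
      · rw [if_pos h2]
        simp [pvCount, pvCut_cons_pos _ _ _ h2]
      · rw [if_neg h2, ih]
        have hc : pvCut e (x :: ks.map (fun k => pvEndOf (pvLookupPatient pd k))) =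
            pvCut e (ks.map (fun k => pvEndOf (pvLookupPatient pd k))) + 1 :=
          pvCut_cons_neg _ _ _ h2
        have hns : ¬ s < x := by omega
        simp [pvCount, hc, List.take_succ_cons, List.filter_cons, hns]

lemma pvLookup_self (pd : List (String × List (String × Int)))
    (hnd : (pd.map Prod.fst).Nodup) :
    ∀ kv ∈ pd, pvLookupPatient pd kv.1 = kv.2 := by
  induction pd with
  | nil => intro kv h; cases h
  | cons p t ih =>
    intro kv hkv
    simp only [List.map_cons, List.nodup_cons] at hnd
    cases hkv with
    | head => simp [pvLookupPatient, List.find?]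
    | tail _ ht =>
      have hne : p.1 ≠ kv.1 := by
        intro h
        exact hnd.1 (h ▸ List.mem_map_of_mem ht)
      have : (p.1 == kv.1) = false := by simpa using hne
      simp only [pvLookupPatient, List.find?, this]
      exact ih hnd.2 kv ht

lemma keys_map_ends (pd : List (String × List (String × Int)))
    (hnd : (pd.map Prod.fst).Nodup) :
    (pd.map Prod.fst).map (fun k => pvEndOf (pvLookupPatient pd k)) =
      pd.map (fun kv => pvEndOf kv.2) := by
  rw [List.map_map]
  exact List.map_congr_left (fun kv hkv => by
    simp [Function.comp, pvLookup_self pd hnd kv hkv])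

-- ===== VERDICT (by name: the statement is the Claim_ definition above) =====
theorem calculate_number_patients_spec : Claim_equal_calculate_number_patients := by
  intro s e pd _ hpre
  unfold Spec_calculate_number_patients calculate_number_patients calculate_number_patients_alt
  rw [pvA_go_count, keys_map_ends pd hpre.1]
  simp [pvCount]
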